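-- pv_equiv track=rewrite | github.com/zenstamon/zenstamon | zenoss_actions.py | summaryEvents
-- ===== SOURCE A (Python) =====
-- def summaryEvents(events ):
--     critical = 0
--     error = 0
--     warning = 0
--     info = 0
--     debug = 0
--     clear = 0
--     for e in events['events'][:]:
--         if e['severity'] == 5:
--             critical = critical + 1
--         elif e['severity'] == 4:
--             error = error + 1
--         elif e['severity'] == 3:
--             warning = warning + 1
--         elif e['severity'] == 2:
--             info = info + 1
--         elif e['severity'] == 1:
--             debug = debug + 1
--         elif e['severity'] == 0:
--             clear = clear + 1
--     totalRows = critical + error + warning + info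
--     severity = []
--     severity.append(critical)
--     severity.append(error)
--     severity.append(warning)
--     severity.append(info)
--     severity.append(debug)
--     severity.append(clear)
--
--     return severity
-- ===== SOURCE B (Python) =====
-- def summaryEvents(events):
--     evs = events['events']
--
--     def tally(chunk):
--         n = len(chunk)
--         if n == 0:
--             return [0, 0, 0, 0, 0, 0]
--         if n == 1:
--             s = chunk[0]['severity']
--             return [1 if s == k else 0 for k in (5, 4, 3, 2, 1, 0)]
--         mid = n // 2
--         return [x + y for x, y in zip(tally(chunk[:mid]), tally(chunk[mid:]))]
--
--     return tally(evs)
-- ===== Notes on version B (the rewrite author's own statement) =====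
-- stated objective: alternative
-- what changed: Replaces the sequential elif-cascade with six scalar accumulators by a divide-and-conquer recursion: each event yields a one-hot severity vector and halves are combined by componentwise vector addition (correct because addition is commutative/associative, so split order does not matter).
import Mathlib
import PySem

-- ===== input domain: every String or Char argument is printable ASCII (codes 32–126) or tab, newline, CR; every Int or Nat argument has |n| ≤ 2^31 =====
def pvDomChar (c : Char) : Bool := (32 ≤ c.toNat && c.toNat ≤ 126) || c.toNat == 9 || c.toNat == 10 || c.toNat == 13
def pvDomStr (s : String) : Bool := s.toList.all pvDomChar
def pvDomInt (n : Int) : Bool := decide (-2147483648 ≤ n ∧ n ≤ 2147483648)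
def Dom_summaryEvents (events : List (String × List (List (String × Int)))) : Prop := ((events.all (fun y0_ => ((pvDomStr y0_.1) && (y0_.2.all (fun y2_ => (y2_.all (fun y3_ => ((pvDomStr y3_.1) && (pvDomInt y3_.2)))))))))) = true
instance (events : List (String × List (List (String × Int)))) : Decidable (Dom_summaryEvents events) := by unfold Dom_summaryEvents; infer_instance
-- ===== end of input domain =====

-- B replaces A's sequential elif-cascade over six scalar accumulators by a divide-and-conquer
-- recursion combining one-hot severity vectors with componentwise addition (objective: alternative).


-- ===== PORT A =====
-- the body of A's for-loop: the elif cascade over the six severity levels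
def pvStepA (st : Int × Int × Int × Int × Int × Int) (e : List (String × Int)) :
    Int × Int × Int × Int × Int × Int :=
  match (PySem.Dict.mk e).get? "severity" with
  | none => st          -- KeyError in Python; excluded by Pre_
  | some v =>
    if v = 5 then (st.1 + 1, st.2.1, st.2.2.1, st.2.2.2.1, st.2.2.2.2.1, st.2.2.2.2.2)
    else if v = 4 then (st.1, st.2.1 + 1, st.2.2.1, st.2.2.2.1, st.2.2.2.2.1, st.2.2.2.2.2)
    else if v = 3 then (st.1, st.2.1, st.2.2.1 + 1, st.2.2.2.1, st.2.2.2.2.1, st.2.2.2.2.2)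
    else if v = 2 then (st.1, st.2.1, st.2.2.1, st.2.2.2.1 + 1, st.2.2.2.2.1, st.2.2.2.2.2)
    else if v = 1 then (st.1, st.2.1, st.2.2.1, st.2.2.2.1, st.2.2.2.2.1 + 1, st.2.2.2.2.2)
    else if v = 0 then (st.1, st.2.1, st.2.2.1, st.2.2.2.1, st.2.2.2.2.1, st.2.2.2.2.2 + 1)
    else st

def summaryEvents (events : List (String × List (List (String × Int)))) : List Int :=
  match (PySem.Dict.mk events).get? "events" with
  | none => []          -- KeyError in Python; excluded by Pre_
  | some evs =>
    let st := (PySem.List.slice evs none none).foldl pvStepA (0, 0, 0, 0, 0, 0)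
    [st.1, st.2.1, st.2.2.1, st.2.2.2.1, st.2.2.2.2.1, st.2.2.2.2.2]

-- ===== PORT B =====
-- chunk[0]['severity'] of B; getD is unreachable under Pre_ (every event has a 'severity' key)
def pvSev (e : List (String × Int)) : Int :=
  ((PySem.Dict.mk e).get? "severity").getD 0

-- B's divide-and-conquer tally: one-hot vector for a singleton, componentwise sum of halves
def pvTally : List (List (String × Int)) → List Int
  | [] => [0, 0, 0, 0, 0, 0]
  | [e] => ([5, 4, 3, 2, 1, 0] : List Int).map (fun k => if pvSev e = k then 1 else 0)
  | e1 :: e2 :: rest =>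
    ((pvTally ((e1 :: e2 :: rest).take ((e1 :: e2 :: rest).length / 2))).zip
      (pvTally ((e1 :: e2 :: rest).drop ((e1 :: e2 :: rest).length / 2)))).map
      (fun p => p.1 + p.2)
termination_by evs => evs.length
decreasing_by
  · simp only [List.length_take, List.length_cons]; omega
  · simp only [List.length_drop, List.length_cons]; omega

def summaryEvents_alt (events : List (String × List (List (String × Int)))) : List Int :=
  match (PySem.Dict.mk events).get? "events" with
  | none => []          -- KeyError in Python; excluded by Pre_
  | some evs => pvTally evs

-- ===== PRECONDITION & SPEC =====
-- Pre_ excludes exactly the inputs where Python A raises KeyError: a missing 'events' key,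
-- or an event dict without a 'severity' key.
def Pre_summaryEvents (events : List (String × List (List (String × Int)))) : Prop :=
  ((PySem.Dict.mk events).get? "events").isSome = true ∧
  ∀ e ∈ ((PySem.Dict.mk events).get? "events").getD [],
    ((PySem.Dict.mk e).get? "severity").isSome = true
instance (events : List (String × List (List (String × Int)))) : Decidable (Pre_summaryEvents events) := by
  unfold Pre_summaryEvents; infer_instance

def pvWitness_summaryEvents : (List (String × List (List (String × Int)))) :=
  [("events", [[("severity", 5)], [("severity", 0)]])]

def Spec_summaryEvents (events : List (String × List (List (String × Int)))) (out : List Int) : Prop := out = summaryEvents_alt events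
instance (events : List (String × List (List (String × Int)))) (out : List Int) : Decidable (Spec_summaryEvents events out) := by unfold Spec_summaryEvents; infer_instance

-- ===== CLAIM (what is proved, stated in full; the proofs are below) =====
def Claim_equal_summaryEvents : Prop := ∀ (events : List (String × List (List (String × Int)))), Dom_summaryEvents events → Pre_summaryEvents events → Spec_summaryEvents events (summaryEvents events)

-- ===== LEMMAS AND PROOFS =====

-- the per-severity count of the projected severity list, as an Int
def pvCnt (evs : List (List (String × Int))) (k : Int) : Int :=
  (List.count k (evs.map pvSev) : Int)

theorem pvCnt_append (xs ys : List (List (String × Int))) (k : Int) :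
    pvCnt (xs ++ ys) k = pvCnt xs k + pvCnt ys k := by
  simp [pvCnt, List.count_append]

theorem pvCnt_split (l : List (List (String × Int))) (m : Nat) (k : Int) :
    pvCnt l k = pvCnt (l.take m) k + pvCnt (l.drop m) k := by
  conv_lhs => rw [← List.take_append_drop m l]
  rw [pvCnt_append]

theorem pvCnt_single (e : List (String × Int)) (k : Int) :
    pvCnt [e] k = if pvSev e = k then 1 else 0 := by
  by_cases h : pvSev e = k <;> simp [pvCnt, h]

-- B's divide-and-conquer tally computes the six severity counts
theorem pvTally_eq (evs : List (List (String × Int))) :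
    pvTally evs = [pvCnt evs 5, pvCnt evs 4, pvCnt evs 3, pvCnt evs 2, pvCnt evs 1, pvCnt evs 0] := by
  induction evs using pvTally.induct with
  | case1 => simp [pvTally, pvCnt]
  | case2 e =>
    rw [pvTally]
    simp [pvCnt_single]
  | case3 e1 e2 rest ih1 ih2 =>
    rw [pvTally, ih1, ih2]
    have h5 := pvCnt_split (e1 :: e2 :: rest) ((e1 :: e2 :: rest).length / 2) 5
    have h4 := pvCnt_split (e1 :: e2 :: rest) ((e1 :: e2 :: rest).length / 2) 4
    have h3 := pvCnt_split (e1 :: e2 :: rest) ((e1 :: e2 :: rest).length / 2) 3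
    have h2 := pvCnt_split (e1 :: e2 :: rest) ((e1 :: e2 :: rest).length / 2) 2
    have h1 := pvCnt_split (e1 :: e2 :: rest) ((e1 :: e2 :: rest).length / 2) 1
    have h0 := pvCnt_split (e1 :: e2 :: rest) ((e1 :: e2 :: rest).length / 2) 0
    simp only [List.zip_cons_cons, List.zip_nil_right, List.map_cons, List.map_nil]
    rw [h5, h4, h3, h2, h1, h0]

-- A's accumulator fold equals the per-severity counts
theorem pvFoldA_eq (evs : List (List (String × Int)))
    (h : ∀ e ∈ evs, ((PySem.Dict.mk e).get? "severity").isSome = true)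
    (c er w i d cl : Int) :
    evs.foldl pvStepA (c, er, w, i, d, cl) =
      (c + pvCnt evs 5, er + pvCnt evs 4, w + pvCnt evs 3,
       i + pvCnt evs 2, d + pvCnt evs 1, cl + pvCnt evs 0) := by
  induction evs generalizing c er w i d cl with
  | nil => simp [pvCnt]
  | cons e rest ih =>
    obtain ⟨v, hv⟩ := Option.isSome_iff_exists.mp (h e (List.mem_cons_self ..))
    have hrest : ∀ e ∈ rest, ((PySem.Dict.mk e).get? "severity").isSome = true :=
      fun e he => h e (List.mem_cons_of_mem _ he)
    have hsev : pvSev e = v := by simp [pvSev, hv]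
    simp only [List.foldl_cons, pvStepA, hv]
    split_ifs with h5 h4 h3 h2 h1 h0 <;>
      (rw [ih hrest]; simp_all [pvCnt]; try omega)

-- ===== VERDICT (by name: the statement is the Claim_ definition above) =====
theorem summaryEvents_spec : Claim_equal_summaryEvents := by
  intro events _ hpre
  obtain ⟨h1, h2⟩ := hpre
  obtain ⟨evs, hget⟩ := Option.isSome_iff_exists.mp h1
  rw [hget, Option.getD_some] at h2
  unfold Spec_summaryEvents summaryEvents summaryEvents_alt
  rw [hget]
  simp only [PySem.List.slice_none_none]
  rw [pvFoldA_eq evs h2, pvTally_eq]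
  simp
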